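-- pv_equiv track=rewrite | github.com/mpuig/agent-slides-v2 | scripts/generate_layout_fixtures.py | _dense_body_target
-- ===== SOURCE A (Python) =====
-- def _dense_body_target(slots: list[str]) -> str | None:
--     for slot in slots:
--         if slot == "body":
--             return slot
--     for slot in slots:
--         if _is_column_slot(slot):
--             return slot
--     return None
--
-- def _is_column_slot(slot_name: str) -> bool:
--     return slot_name.startswith("col") and slot_name[3:].isdigit()
-- ===== SOURCE B (Python) =====
-- def _dense_body_target(slots: list[str]) -> str | None:
--     first_col = None
--     for slot in slots:
--         if slot == "body":
--             return slot
--         if first_col is None and _is_column_slot(slot):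
--             first_col = slot
--     return first_col
--
-- def _is_column_slot(slot_name: str) -> bool:
--     return slot_name.startswith("col") and slot_name[3:].isdigit()
-- ===== Notes on version B (the rewrite author's own statement) =====
-- stated objective: alternative
-- what changed: Replaced A's two sequential scans (one for "body", a second for the first column slot) by a single pass that returns "body" immediately and remembers the first column slot in an accumulator.
import Mathlib
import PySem

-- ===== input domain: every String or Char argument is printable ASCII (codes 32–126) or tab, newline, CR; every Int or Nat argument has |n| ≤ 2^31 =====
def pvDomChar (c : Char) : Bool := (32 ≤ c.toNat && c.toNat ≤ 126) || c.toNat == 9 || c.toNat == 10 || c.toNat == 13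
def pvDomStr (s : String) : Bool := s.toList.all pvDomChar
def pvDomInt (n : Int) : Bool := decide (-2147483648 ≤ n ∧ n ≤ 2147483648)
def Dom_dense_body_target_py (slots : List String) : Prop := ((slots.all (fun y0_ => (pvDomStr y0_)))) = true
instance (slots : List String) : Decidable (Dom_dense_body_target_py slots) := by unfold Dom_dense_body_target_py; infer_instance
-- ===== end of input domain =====

-- B replaces A's two sequential scans by one pass that remembers the first column slot; objective: alternative (same cost, single traversal).

-- ===== PORT A =====
-- _is_column_slot: slot_name.startswith("col") and slot_name[3:].isdigit()
def pvIsColumnSlot (s : String) : Bool :=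
  PySem.Str.startswith s "col" && PySem.Str.strIsdigit (PySem.Str.slice s (some 3) none)

-- first loop of A: return slot if slot == "body"
def pvALoop1 : List String → Option String
  | [] => none
  | s :: rest => if s == "body" then some s else pvALoop1 rest

-- second loop of A: return first column slot
def pvALoop2 : List String → Option String
  | [] => none
  | s :: rest => if pvIsColumnSlot s then some s else pvALoop2 rest

def dense_body_target_py (slots : List String) : Option String :=
  match pvALoop1 slots with
  | some v => some v
  | none => pvALoop2 slots

-- ===== PORT B =====
-- single loop with an accumulator first_col (Source B)
def pvBLoop : List String → Option String → Option String
  | [], firstCol => firstCol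
  | s :: rest, firstCol =>
    if s == "body" then some s
    else pvBLoop rest (if firstCol.isNone && pvIsColumnSlot s then some s else firstCol)

def dense_body_target_py_alt (slots : List String) : Option String :=
  pvBLoop slots none

-- ===== PRECONDITION & SPEC =====
def Spec_dense_body_target_py (slots : List String) (out : Option String) : Prop := out = dense_body_target_py_alt slots
instance (slots : List String) (out : Option String) : Decidable (Spec_dense_body_target_py slots out) := by unfold Spec_dense_body_target_py; infer_instance

-- ===== CLAIM (what is proved, stated in full; the proofs are below) =====
def Claim_equal_dense_body_target_py : Prop := ∀ (slots : List String), Dom_dense_body_target_py slots → Spec_dense_body_target_py slots (dense_body_target_py slots)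

-- ===== LEMMAS AND PROOFS =====
theorem pvBLoop_eq (slots : List String) : ∀ (acc : Option String),
    pvBLoop slots acc =
      match pvALoop1 slots with
      | some v => some v
      | none => match acc with
        | some c => some c
        | none => pvALoop2 slots := by
  induction slots with
  | nil => intro acc; cases acc <;> simp [pvBLoop, pvALoop1, pvALoop2]
  | cons s rest ih =>
    intro acc
    by_cases hb : s == "body"
    · simp [pvBLoop, pvALoop1, hb]
    · cases acc with
      | some c => simp [pvBLoop, pvALoop1, hb, ih]
      | none =>
        by_cases hc : pvIsColumnSlot s <;>
          simp [pvBLoop, pvALoop1, pvALoop2, hb, hc, ih]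

-- ===== VERDICT (by name: the statement is the Claim_ definition above) =====
theorem dense_body_target_py_spec : Claim_equal_dense_body_target_py := by
  intro slots _
  unfold Spec_dense_body_target_py dense_body_target_py dense_body_target_py_alt
  rw [pvBLoop_eq]
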